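-- pv_equiv track=rewrite | github.com/alexancp/wick | examples/playground/os_ccs.py | make_nice_string
-- ===== SOURCE A (Python) =====
-- def introduce_exponent(string: str, tensor: str, position: int):
--     exponent = string.count(tensor)
--     if exponent == 1:
--         return string
--     temp = string.replace(tensor, "", exponent-1)
--     replacement = f"{tensor[:position]}^{{{exponent}}}{tensor[position:]}"
--     out = temp.replace(tensor, replacement, 1)
--     return out
--
-- def make_nice_string(lines):
--     out = ""
--     for term in lines.split("\n"):
--         temp = introduce_exponent(term, "\\sin(\\theta)_{}", 4)
--         out += introduce_exponent(temp, "\\cos(\\theta)_{}", 4)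
--         out += "\n"
--     final = out.replace("_{}", "")
--     return final
-- ===== SOURCE B (Python) =====
-- SIN = "\\sin(\\theta)_{}"
-- COS = "\\cos(\\theta)_{}"
--
--
-- def _condense(term, tensor):
--     # one explicit character-level scan: collect the segments between
--     # occurrences, the occurrence count and the trailing text in a single pass
--     n = len(tensor)
--     segs = []
--     cur = []
--     k = 0
--     i = 0
--     while i < len(term):
--         if term.startswith(tensor, i):
--             segs.append("".join(cur))
--             cur = []
--             k += 1
--             i += n
--         else:
--             cur.append(term[i])
--             i += 1
--     if k < 2:
--         return term
--     tail = "".join(cur)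
--     rep = tensor[:4] + "^{" + str(k) + "}" + tensor[4:]
--     rebuilt = "".join(segs) + tensor + tail
--     # insert rep at the first occurrence (guaranteed to exist: k >= 2)
--     j = 0
--     while not rebuilt.startswith(tensor, j):
--         j += 1
--     return rebuilt[:j] + rep + rebuilt[j + n:]
--
--
-- def make_nice_string(lines):
--     new_lines = [_condense(_condense(t, SIN), COS) for t in lines.split("\n")]
--     return ("\n".join(new_lines) + "\n").replace("_{}", "")
-- ===== Notes on version B (the rewrite author's own statement) =====
-- stated objective: alternative
-- what changed: A's three staged string builtins per tensor (count, a truncating replace that deletes all but the last occurrence, a count-limited replace that inserts the exponent) are replaced in B by one explicit character-level scan with accumulators that collects the inter-occurrence segments, the occurrence count and the trailing text in a single pass, followed by an explicit index loop that inserts the exponent at the first occurrence of the rebuilt string; output lines are collected in a list and joined instead of accumulated with +=.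
import Mathlib
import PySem

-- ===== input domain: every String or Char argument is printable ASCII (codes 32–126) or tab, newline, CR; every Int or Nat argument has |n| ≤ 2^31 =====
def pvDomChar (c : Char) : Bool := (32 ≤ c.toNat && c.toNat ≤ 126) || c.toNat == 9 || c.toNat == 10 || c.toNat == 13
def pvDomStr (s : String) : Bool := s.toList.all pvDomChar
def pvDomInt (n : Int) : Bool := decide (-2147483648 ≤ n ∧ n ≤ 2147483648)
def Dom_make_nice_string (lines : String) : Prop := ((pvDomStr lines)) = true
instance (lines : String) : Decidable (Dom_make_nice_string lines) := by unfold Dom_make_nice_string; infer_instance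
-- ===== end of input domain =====

-- B replaces A's staged builtins (count + two truncating replaces) per tensor by one explicit
-- character-level scan with accumulators plus one explicit insertion loop; objective: a
-- different decomposition of the same linear text pass (no speed claim).

-- the tensor literals and the "_{}" cleanup literal (shared data, used by both ports)
def pvSin : List Char := "\\sin(\\theta)_{}".toList
def pvCos : List Char := "\\cos(\\theta)_{}".toList
def pvUnd : List Char := "_{}".toList

-- ===== PORT A =====
-- hand port of Python s.replace(old, new, cnt): CPython's left-to-right scan, cnt < 0 = unlimited;
-- exact for nonempty old (every call site passes a nonempty literal; for old = "" Python instead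
-- inserts new at every gap).  (c :: r).drop old.length = r.drop (old.length - 1) for nonempty old.
def pvReplaceMax (old new : List Char) (cnt : Int) : List Char → List Char
  | [] => []
  | c :: r =>
    if cnt = 0 then c :: r
    else if old.isPrefixOf (c :: r) then
      new ++ pvReplaceMax old new (cnt - 1) (r.drop (old.length - 1))
    else c :: pvReplaceMax old new cnt r
termination_by s => s.length
decreasing_by
  all_goals (simp; try omega)

def pvIntroduceExponent (s t : List Char) (position : Int) : List Char :=
  let exponent := PySem.Chars.count s t
  if exponent == 1 then s
  else
    let temp := pvReplaceMax t [] ((exponent : Int) - 1) s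
    let replacement := PySem.List.slice t none (some position) ++ ('^' :: '{' :: []) ++
      (PySem.Int.toStr (exponent : Int)).toList ++ ['}'] ++ PySem.List.slice t (some position) none
    pvReplaceMax t replacement 1 temp

def make_nice_string (lines : String) : String :=
  let out := (PySem.Chars.splitOn lines.toList ['\n']).foldl
    (fun acc term =>
      let temp := pvIntroduceExponent term pvSin 4
      (acc ++ pvIntroduceExponent temp pvCos 4) ++ ['\n']) []
  String.ofList (PySem.Chars.replace out pvUnd [])

-- ===== PORT B =====
-- hand port of B's scanning while-loop over index i (the recursion argument is term[i:]);
-- term.startswith(tensor, i) is tensor.isPrefixOf (term drop i); exact for nonempty tensor.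
-- cur is kept in order (Python appends characters at the end), segs likewise.
def pvScanGo (t : List Char) (segs : List (List Char)) (cur : List Char) (k : Nat) :
    List Char → List (List Char) × List Char × Nat
  | [] => (segs, cur, k)
  | c :: r =>
    if t.isPrefixOf (c :: r) then
      pvScanGo t (segs ++ [cur]) [] (k + 1) (r.drop (t.length - 1))
    else
      pvScanGo t segs (cur ++ [c]) k r
termination_by s => s.length
decreasing_by
  all_goals (simp; try omega)

-- hand port of B's insertion loop: walk to the first occurrence of t, splice rep in; the
-- Python loop does not terminate when t does not occur (unreachable at the call site, where
-- k >= 2 guarantees an occurrence), so the [] base case is never reached from B's control flow.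
def pvInsertAt (t rep : List Char) : List Char → List Char
  | [] => []
  | c :: r =>
    if t.isPrefixOf (c :: r) then rep ++ r.drop (t.length - 1)
    else c :: pvInsertAt t rep r
termination_by s => s.length
decreasing_by
  all_goals (simp; try omega)

def pvCondense (term t : List Char) : List Char :=
  let res := pvScanGo t [] [] 0 term
  let segs := res.1
  let tail := res.2.1
  let k := res.2.2
  if k < 2 then term
  else
    let rep := PySem.List.slice t none (some 4) ++ ('^' :: '{' :: []) ++
      (PySem.Int.toStr (k : Int)).toList ++ ['}'] ++ PySem.List.slice t (some 4) none
    let rebuilt := PySem.Chars.join [] segs ++ t ++ tail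
    pvInsertAt t rep rebuilt

def make_nice_string_alt (lines : String) : String :=
  let newLines := (PySem.Chars.splitOn lines.toList ['\n']).map
    (fun term => pvCondense (pvCondense term pvSin) pvCos)
  String.ofList (PySem.Chars.replace (PySem.Chars.join ['\n'] newLines ++ ['\n']) pvUnd [])

-- ===== PRECONDITION & SPEC =====
def Spec_make_nice_string (lines : String) (out : String) : Prop := out = make_nice_string_alt lines
instance (lines : String) (out : String) : Decidable (Spec_make_nice_string lines out) := by unfold Spec_make_nice_string; infer_instance

-- ===== CLAIM (what is proved, stated in full; the proofs are below) =====
def Claim_equal_make_nice_string : Prop := ∀ (lines : String), Dom_make_nice_string lines → Spec_make_nice_string lines (make_nice_string lines)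

-- ===== LEMMAS AND PROOFS =====

-- proof-side recursive characterisations of Python's occurrence scan (nonempty needle t)
def pvCount (t : List Char) : List Char → Nat
  | [] => 0
  | c :: r => if t.isPrefixOf (c :: r) then pvCount t (r.drop (t.length - 1)) + 1 else pvCount t r
termination_by s => s.length
decreasing_by
  all_goals (simp; try omega)

def pvSplit (t : List Char) : List Char → List (List Char)
  | [] => [[]]
  | c :: r => if t.isPrefixOf (c :: r) then [] :: pvSplit t (r.drop (t.length - 1)) else (pvSplit t r).modifyHead (c :: ·)
termination_by s => s.length
decreasing_by
  all_goals (simp; try omega)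

lemma pvSplit_length (t : List Char) (s : List Char) : (pvSplit t s).length = pvCount t s + 1 := by
  fun_induction pvSplit t s with
  | case1 => simp [pvCount]
  | case2 c r h ih => rw [pvCount]; simp [h, ih]
  | case3 c r h ih => rw [pvCount]; simp [h, ih]

lemma pvSplit_ne_nil (t s : List Char) : pvSplit t s ≠ [] := by
  intro h
  have := pvSplit_length t s
  simp [h] at this

-- bridge: PySem.Chars.count is pvCount (nonempty needle)
lemma count_go_eq (t : List Char) (ht : t ≠ []) :
    ∀ fuel s acc, List.length s ≤ fuel → PySem.Chars.count.go t fuel s acc = acc + pvCount t s := by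
  intro fuel
  induction fuel with
  | zero =>
    intro s acc h
    have hs : s = [] := by cases s <;> simp_all
    subst hs
    rw [PySem.Chars.count.go, pvCount]
    omega
  | succ n ih =>
    intro s acc h
    cases s with
    | nil =>
      rw [PySem.Chars.count.go, pvCount]
      all_goals (intros; omega)
    | cons c r =>
      obtain ⟨a, t', rfl⟩ : ∃ a t', t = a :: t' := by
        cases t with
        | nil => exact absurd rfl ht
        | cons a t' => exact ⟨a, t', rfl⟩
      rw [PySem.Chars.count.go]
      by_cases hp : (a :: t').isPrefixOf (c :: r) = true
      · simp only [hp, if_true, List.drop_succ_cons, List.length_cons]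
        rw [ih _ _ (by rw [List.length_drop]; simp at h; omega)]
        rw [pvCount]
        simp [hp]
        omega
      · dsimp only
        rw [if_neg hp]
        rw [ih _ _ (by simp at h; omega)]
        rw [pvCount, if_neg hp]

lemma count_eq_pvCount (t s : List Char) (ht : t ≠ []) : PySem.Chars.count s t = pvCount t s := by
  have he : t.isEmpty = false := by cases t with | nil => exact absurd rfl ht | cons a b => rfl
  rw [PySem.Chars.count, he]
  simp only [Bool.false_eq_true, if_false]
  rw [count_go_eq t ht s.length s 0 le_rfl]
  omega

-- bridge: PySem.Chars.splitOn is pvSplit (nonempty separator)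
lemma split_go_eq (t : List Char) (ht : t ≠ []) :
    ∀ fuel l cur acc, List.length l < fuel →
      PySem.Chars.splitOn.go t fuel l cur acc = acc.reverse ++ (pvSplit t l).modifyHead (cur.reverse ++ ·) := by
  intro fuel
  induction fuel with
  | zero => intro l cur acc h; omega
  | succ n ih =>
    intro l cur acc h
    cases l with
    | nil => rw [PySem.Chars.splitOn.go.eq_def, pvSplit]; simp
    | cons c r =>
      obtain ⟨a, t', rfl⟩ : ∃ a t', t = a :: t' := by
        cases t with
        | nil => exact absurd rfl ht
        | cons a t' => exact ⟨a, t', rfl⟩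
      rw [PySem.Chars.splitOn.go.eq_def]
      by_cases hp : (a :: t').isPrefixOf (c :: r) = true
      · simp only [hp, if_true, List.drop_succ_cons, List.length_cons]
        rw [ih _ _ _ (by rw [List.length_drop]; simp at h; omega)]
        rw [pvSplit]
        simp [hp]
        cases pvSplit (a :: t') (List.drop t'.length r) <;> rfl
      · dsimp only
        rw [if_neg hp]
        rw [ih _ _ _ (by simp at h; omega)]
        rw [pvSplit]
        rw [if_neg hp]
        obtain ⟨p, ps, hps⟩ : ∃ p ps, pvSplit (a :: t') r = p :: ps := by
          cases hq : pvSplit (a :: t') r with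
          | nil => exact absurd hq (pvSplit_ne_nil _ _)
          | cons p ps => exact ⟨p, ps, rfl⟩
        rw [hps]
        simp

lemma splitOn_eq_pvSplit (t s : List Char) (ht : t ≠ []) : PySem.Chars.splitOn s t = pvSplit t s := by
  rw [PySem.Chars.splitOn, split_go_eq t ht (s.length + 1) s [] [] (by omega)]
  obtain ⟨p, ps, hps⟩ : ∃ p ps, pvSplit t s = p :: ps := by
    cases hq : pvSplit t s with
    | nil => exact absurd hq (pvSplit_ne_nil _ _)
    | cons p ps => exact ⟨p, ps, rfl⟩
  rw [hps]
  simp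

-- replace with count 0 is the identity
lemma pvReplaceMax_zero (t rep s : List Char) : pvReplaceMax t rep 0 s = s := by
  cases s with
  | nil => rw [pvReplaceMax]
  | cons c r => rw [pvReplaceMax]; simp

-- no occurrence: replace is the identity
lemma pvReplaceMax_of_count_zero (t new s : List Char) (cnt : Int) (h : pvCount t s = 0) :
    pvReplaceMax t new cnt s = s := by
  induction s with
  | nil => rw [pvReplaceMax]
  | cons c r ih =>
    rw [pvCount] at h
    by_cases hp : t.isPrefixOf (c :: r) = true
    · simp [hp] at h
    · rw [if_neg hp] at h
      rw [pvReplaceMax]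
      simp [hp, ih h]

-- reconstruction: the split parts glued back with t give back s
def pvJoinSep (sep : List Char) : List (List Char) → List Char
  | [] => []
  | [x] => x
  | x :: y :: r => x ++ sep ++ pvJoinSep sep (y :: r)

lemma pvSplit_reconstruct (t : List Char) (ht : t ≠ []) (s : List Char) :
    pvJoinSep t (pvSplit t s) = s := by
  fun_induction pvSplit t s with
  | case1 => rfl
  | case2 c r h ih =>
    obtain ⟨p, ps, hps⟩ : ∃ p ps, pvSplit t (r.drop (t.length - 1)) = p :: ps := by
      cases hq : pvSplit t (r.drop (t.length - 1)) with
      | nil => exact absurd hq (pvSplit_ne_nil _ _)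
      | cons p ps => exact ⟨p, ps, rfl⟩
    rw [hps] at ih ⊢
    obtain ⟨u, hu⟩ := (List.isPrefixOf_iff_prefix.mp h)
    obtain ⟨a, t', rfl⟩ : ∃ a t', t = a :: t' := by
      cases t with
      | nil => exact absurd rfl ht
      | cons a t' => exact ⟨a, t', rfl⟩
    have hdu : r.drop t'.length = u := by
      have h2 : List.drop (a :: t').length (a :: t' ++ u) = List.drop (a :: t').length (c :: r) := by rw [hu]
      rw [List.drop_left, List.length_cons, List.drop_succ_cons] at h2
      exact h2.symm
    rw [pvJoinSep]
    simp only [List.nil_append, List.length_cons, Nat.add_sub_cancel] at *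
    rw [hdu] at ih
    rw [ih]
    exact hu
  | case3 c r h ih =>
    obtain ⟨p, ps, hps⟩ : ∃ p ps, pvSplit t r = p :: ps := by
      cases hq : pvSplit t r with
      | nil => exact absurd hq (pvSplit_ne_nil _ _)
      | cons p ps => exact ⟨p, ps, rfl⟩
    rw [hps] at ih ⊢
    cases ps with
    | nil => simp only [List.modifyHead, pvJoinSep] at ih ⊢; rw [ih]
    | cons q ps' =>
      rw [pvJoinSep] at ih
      simp only [List.modifyHead]
      rw [pvJoinSep]
      rw [← ih]
      simp

-- t is a prefix: the tail after the match, via List.drop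
lemma drop_cons_of_ne_nil (t : List Char) (ht : t ≠ []) (c : Char) (r : List Char) :
    (c :: r).drop t.length = r.drop (t.length - 1) := by
  obtain ⟨a, t', rfl⟩ : ∃ a t', t = a :: t' := by
    cases t with
    | nil => exact absurd rfl ht
    | cons a t' => exact ⟨a, t', rfl⟩
  simp

lemma prefix_glue (t : List Char) (ht : t ≠ []) (c : Char) (r : List Char)
    (h : t.isPrefixOf (c :: r) = true) : c :: r = t ++ r.drop (t.length - 1) := by
  obtain ⟨u, hu⟩ := List.isPrefixOf_iff_prefix.mp h
  have h2 : List.drop t.length (t ++ u) = List.drop t.length (c :: r) := by rw [hu]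
  rw [List.drop_left] at h2
  rw [← hu, h2, drop_cons_of_ne_nil t ht c r]

lemma pvSplit_of_count_zero (t : List Char) (ht : t ≠ []) (s : List Char) (h : pvCount t s = 0) :
    pvSplit t s = [s] := by
  have hl := pvSplit_length t s
  rw [h] at hl
  obtain ⟨p, hp⟩ : ∃ p, pvSplit t s = [p] := by
    cases hq : pvSplit t s with
    | nil => exact absurd hq (pvSplit_ne_nil _ _)
    | cons p ps =>
      cases ps with
      | nil => exact ⟨p, rfl⟩
      | cons q ps' => rw [hq] at hl; simp at hl
  have hr := pvSplit_reconstruct t ht s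
  rw [hp] at hr ⊢
  simp only [pvJoinSep] at hr
  rw [hr]

-- dropping the first (count - 1) occurrences leaves parts[:-1] glued, one t, and the last part
lemma pvReplaceMax_all_but_last (t : List Char) (ht : t ≠ []) :
    ∀ s, 1 ≤ pvCount t s →
      pvReplaceMax t [] ((pvCount t s : Int) - 1) s =
        ((pvSplit t s).dropLast).flatten ++ t ++ (pvSplit t s).getLastD [] := by
  intro s
  fun_induction pvCount t s with
  | case1 =>
    intro h1
    exact absurd h1 (by omega)
  | case2 c r h ih =>
    intro _
    rw [pvSplit, if_pos h]
    have hc1 : ((pvCount t (r.drop (t.length - 1)) + 1 : Nat) : Int) - 1 =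
        ((pvCount t (r.drop (t.length - 1)) : Nat) : Int) := by push_cast; ring
    rw [hc1]
    by_cases h0 : pvCount t (r.drop (t.length - 1)) = 0
    · rw [h0, Nat.cast_zero, pvReplaceMax_zero, pvSplit_of_count_zero t ht _ h0]
      simp
      exact prefix_glue t ht c r h
    · rw [pvReplaceMax]
      rw [if_neg (by exact_mod_cast h0)]
      rw [if_pos h]
      rw [List.nil_append, ih (by omega)]
      obtain ⟨p, q, ps, hps⟩ : ∃ p q ps, pvSplit t (r.drop (t.length - 1)) = p :: q :: ps := by
        have hl := pvSplit_length t (r.drop (t.length - 1))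
        cases hq : pvSplit t (r.drop (t.length - 1)) with
        | nil => exact absurd hq (pvSplit_ne_nil _ _)
        | cons p ps =>
          cases ps with
          | nil => rw [hq] at hl; simp at hl; omega
          | cons q ps' => exact ⟨p, q, ps', rfl⟩
      rw [hps]
      simp
  | case3 c r h ih =>
    intro h1
    rw [pvSplit, if_neg h]
    rw [pvReplaceMax]
    by_cases h2 : pvCount t r = 1
    · rw [h2]
      rw [if_pos (by norm_num : ((1 : Nat) : Int) - 1 = 0)]
      obtain ⟨p, q, hpq⟩ : ∃ p q, pvSplit t r = [p, q] := by
        have hl := pvSplit_length t r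
        rw [h2] at hl
        cases hq : pvSplit t r with
        | nil => exact absurd hq (pvSplit_ne_nil _ _)
        | cons p ps =>
          rw [hq] at hl
          cases ps with
          | nil => simp at hl
          | cons q ps' =>
            cases ps' with
            | nil => exact ⟨p, q, rfl⟩
            | cons w ws => simp at hl
      have hr := pvSplit_reconstruct t ht r
      rw [hpq] at hr ⊢
      simp only [pvJoinSep] at hr
      simp only [List.modifyHead]
      simp
      rw [← hr]
      simp
    · rw [if_neg (by omega)]
      rw [if_neg h]
      rw [ih h1]
      obtain ⟨p, q, ps, hps⟩ : ∃ p q ps, pvSplit t r = p :: q :: ps := by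
        have hl := pvSplit_length t r
        cases hq : pvSplit t r with
        | nil => exact absurd hq (pvSplit_ne_nil _ _)
        | cons p ps =>
          cases ps with
          | nil => rw [hq] at hl; simp at hl; omega
          | cons q ps' => exact ⟨p, q, ps', rfl⟩
      rw [hps]
      simp

-- replacing the first occurrence is exactly B's insertion loop, on every string
lemma pvReplaceMax_one_eq_insert (t rep : List Char) :
    ∀ u, pvReplaceMax t rep 1 u = pvInsertAt t rep u := by
  intro u
  induction u with
  | nil => rw [pvReplaceMax, pvInsertAt]
  | cons c r ih =>
    rw [pvReplaceMax, pvInsertAt]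
    by_cases hp : t.isPrefixOf (c :: r) = true
    · rw [if_neg (by norm_num : (1:Int) ≠ 0), if_pos hp, if_pos hp]
      simp [pvReplaceMax_zero]
    · rw [if_neg (by norm_num : (1:Int) ≠ 0), if_neg hp, if_neg hp, ih]

-- B's scan computed against pvSplit/pvCount: segs = parts[:-1] (head extended by cur),
-- tail = last part, k incremented by the occurrence count
lemma pvScanGo_spec (t : List Char) :
    ∀ s segs cur k,
      pvScanGo t segs cur k s =
        (segs ++ ((pvSplit t s).modifyHead (cur ++ ·)).dropLast,
         ((pvSplit t s).modifyHead (cur ++ ·)).getLastD [],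
         k + pvCount t s) := by
  intro s
  fun_induction pvSplit t s with
  | case1 =>
    intro segs cur k
    rw [pvScanGo, pvCount]
    simp
  | case2 c r h ih =>
    intro segs cur k
    rw [pvScanGo, if_pos h, ih, pvCount, if_pos h]
    obtain ⟨p, ps, hps⟩ : ∃ p ps, pvSplit t (r.drop (t.length - 1)) = p :: ps := by
      cases hq : pvSplit t (r.drop (t.length - 1)) with
      | nil => exact absurd hq (pvSplit_ne_nil _ _)
      | cons p ps => exact ⟨p, ps, rfl⟩
    rw [hps]
    simp
    omega
  | case3 c r h ih =>
    intro segs cur k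
    rw [pvScanGo, if_neg h, ih, pvCount, if_neg h]
    obtain ⟨p, ps, hps⟩ : ∃ p ps, pvSplit t r = p :: ps := by
      cases hq : pvSplit t r with
      | nil => exact absurd hq (pvSplit_ne_nil _ _)
      | cons p ps => exact ⟨p, ps, rfl⟩
    rw [hps]
    simp

-- PySem glue fact used by B's port
lemma join_nil_eq_flatten (ps : List (List Char)) : PySem.Chars.join [] ps = ps.flatten := by
  induction ps with
  | nil => rw [PySem.Chars.join_nil]; rfl
  | cons p rest ih =>
    cases rest with
    | nil => rw [PySem.Chars.join_singleton]; simp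
    | cons q rs => rw [PySem.Chars.join_cons_cons, ih]; simp

-- the per-term functions agree (nonempty tensor)
lemma intro_eq_condense (t : List Char) (ht : t ≠ []) (s : List Char) :
    pvIntroduceExponent s t 4 = pvCondense s t := by
  simp only [pvIntroduceExponent, pvCondense, count_eq_pvCount t s ht, pvScanGo_spec]
  cases hn : pvCount t s with
  | zero =>
    norm_num
    rw [pvReplaceMax_of_count_zero t [] s _ hn,
      pvReplaceMax_of_count_zero t _ s _ hn]
  | succ m =>
    cases m with
    | zero => norm_num
    | succ m' =>
      have hne1 : ¬ (m' + 1 + 1 == 1) = true := by simp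
      rw [if_neg hne1]
      rw [if_neg (by omega : ¬ 0 + (m' + 1 + 1) < 2)]
      have hid : (pvSplit t s).modifyHead (([] : List Char) ++ ·) = pvSplit t s := by
        cases pvSplit t s <;> simp
      rw [hid, join_nil_eq_flatten]
      have habl := pvReplaceMax_all_but_last t ht s (by omega)
      rw [hn] at habl
      rw [habl, pvReplaceMax_one_eq_insert]
      norm_num

-- A's accumulation loop is "\n".join + "\n"
lemma foldl_lines (f : List Char → List Char) :
    ∀ (ts : List (List Char)) (a : List Char), ts ≠ [] →
      ts.foldl (fun acc term => (acc ++ f term) ++ ['\n']) a =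
        a ++ PySem.Chars.join ['\n'] (ts.map f) ++ ['\n'] := by
  intro ts
  induction ts with
  | nil => intro a h; exact absurd rfl h
  | cons x xs ih =>
    intro a _
    cases xs with
    | nil => simp [PySem.Chars.join_singleton, List.append_assoc]
    | cons y ys =>
      rw [List.foldl_cons, ih ((a ++ f x) ++ ['\n']) (by simp)]
      simp only [List.map_cons]
      rw [PySem.Chars.join_cons_cons]
      simp [List.append_assoc]

-- ===== VERDICT (by name: the statement is the Claim_ definition above) =====
theorem make_nice_string_spec : Claim_equal_make_nice_string := by
  intro lines _
  unfold Spec_make_nice_string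
  simp only [make_nice_string, make_nice_string_alt]
  have hnl : (['\n'] : List Char) ≠ [] := by simp
  have hts : PySem.Chars.splitOn lines.toList ['\n'] ≠ [] := by
    rw [splitOn_eq_pvSplit _ _ hnl]
    exact pvSplit_ne_nil _ _
  rw [foldl_lines _ _ _ hts]
  have hfun : (fun term => pvIntroduceExponent (pvIntroduceExponent term pvSin 4) pvCos 4) =
      (fun term => pvCondense (pvCondense term pvSin) pvCos) := by
    funext term
    rw [intro_eq_condense pvSin (by decide) term,
      intro_eq_condense pvCos (by decide) (pvCondense term pvSin)]
  rw [hfun]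
  simp
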